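-- pv_equiv track=rewrite | github.com/JoetheManHowie/TwitterData | analysis3.py | bow
-- ===== SOURCE A (Python) =====
-- def bow(series):
--     bag = {}
--     for tweet in series:
--         for word in tweet.split():
--             if word not in bag.keys():
--                 bag[word] = 1
--             else:
--                 bag[word] += 1
--
--
--
--     return set([key for key, val in bag.items() if val > 1])
-- ===== SOURCE B (Python) =====
-- def bow(series):
--     words = [w for tweet in series for w in tweet.split()]
--     return {w for i, w in enumerate(words) if w in words[i + 1:]}
-- ===== Notes on version B (the rewrite author's own statement) =====
-- stated objective: simpler
-- what changed: Replaces the dict-based frequency count with a two-line set comprehension over the flattened word list that keeps a word exactly when it occurs again later in the list.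
import Mathlib
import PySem

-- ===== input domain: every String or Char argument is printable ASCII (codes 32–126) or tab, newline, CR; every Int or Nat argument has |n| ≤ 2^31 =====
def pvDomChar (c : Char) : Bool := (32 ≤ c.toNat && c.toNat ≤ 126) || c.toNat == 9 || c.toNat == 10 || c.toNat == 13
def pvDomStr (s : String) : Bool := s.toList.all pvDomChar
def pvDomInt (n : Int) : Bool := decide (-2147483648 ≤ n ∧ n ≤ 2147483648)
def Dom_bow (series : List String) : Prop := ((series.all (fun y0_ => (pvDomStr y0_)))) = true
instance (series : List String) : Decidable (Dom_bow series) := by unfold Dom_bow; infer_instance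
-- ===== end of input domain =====

-- B replaces A's dict-based frequency count with a set comprehension over the flattened word
-- list keeping the words that occur again later (simpler, not faster).

-- ===== PORT A =====
def bow (series : List String) : List String :=
  let bag : PySem.Dict String Int :=
    series.foldl (fun bag tweet =>
      (PySem.Str.split₀ tweet).foldl (fun bag word =>
        if bag.contains word = false then bag.insert word 1
        else bag.insert word (bag.getD word 0 + 1)) bag) PySem.Dict.empty
  PySem.Set.ofList ((bag.items.filter (fun p => decide (1 < p.2))).map Prod.fst)

-- ===== PORT B =====
def bow_alt (series : List String) : List String :=
  let words := series.flatMap (fun tweet => PySem.Str.split₀ tweet)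
  PySem.Set.ofList
    (((PySem.List.enumerate words).filter
        (fun p => (PySem.List.slice words (some (p.1 + 1)) none).contains p.2)).map Prod.snd)

-- ===== PRECONDITION & SPEC =====
def Spec_bow (series : List String) (out : List String) : Prop := out = bow_alt series
instance (series : List String) (out : List String) : Decidable (Spec_bow series out) := by unfold Spec_bow; infer_instance

-- ===== CLAIM (what is proved, stated in full; the proofs are below) =====
def Claim_equal_bow : Prop := ∀ (series : List String), Dom_bow series → Spec_bow series (bow series)

-- ===== LEMMAS AND PROOFS =====

-- the words that occur again later in the list, one entry per non-final occurrence
def laterDup : List String → List String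
  | [] => []
  | x :: r => (if r.contains x then [x] else []) ++ laterDup r

lemma bow_step_eq :
    (fun (bag : PySem.Dict String Int) word =>
        if bag.contains word = false then bag.insert word 1
        else bag.insert word (bag.getD word 0 + 1)) =
    (fun d x => d.insert x (d.getD x 0 + 1)) := by
  funext d x
  by_cases h : d.contains x = false
  · simp [h, PySem.Dict.getD_of_not_contains d 0 h]
  · simp [h]

lemma enumerate_cons (x : String) (r : List String) (s : Int) :
    PySem.List.enumerate (x :: r) s = (s, x) :: PySem.List.enumerate r (s + 1) := rfl

lemma enum_filter_eq (l : List String) :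
    ∀ (k : Nat) (full : List String), full.drop k = l →
      ((PySem.List.enumerate l (k : Int)).filter
          (fun p => (PySem.List.slice full (some (p.1 + 1)) none).contains p.2)).map Prod.snd
        = laterDup l := by
  induction l with
  | nil => intro k full _; rfl
  | cons x r ih =>
    intro k full hfull
    have hdrop : full.drop (k + 1) = r := by
      rw [← List.tail_drop, hfull]
      rfl
    have hen : ((k : Int) + 1) = ((k + 1 : Nat) : Int) := by push_cast; ring
    have hslice : PySem.List.slice full (some ((k : Int) + 1)) none = r := by
      rw [hen, PySem.List.slice_from full (by positivity)]
      simpa using hdrop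
    have ihr := ih (k + 1) full hdrop
    rw [enumerate_cons, List.filter_cons]
    by_cases hx : r.contains x = true
    · simp only [hslice, hx, if_pos, List.map_cons, laterDup, List.cons_append, List.nil_append]
      rw [hen, ihr]
    · simp only [hslice, hx, Bool.false_eq_true, if_false, laterDup, List.nil_append]
      rw [hen, ihr]

lemma mem_set_add {s : PySem.Set String} {x y : String} (h : y ∈ s) : y ∈ PySem.Set.add s x := by
  simp only [PySem.Set.add]
  split
  · exact h
  · exact List.mem_append_left _ h

lemma self_mem_set_add (s : PySem.Set String) (x : String) : x ∈ PySem.Set.add s x := by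
  simp only [PySem.Set.add, PySem.Set.contains]
  split
  · next h => exact List.contains_iff_mem.mp h
  · simp

lemma set_add_of_mem {s : PySem.Set String} {x : String} (h : x ∈ s) : PySem.Set.add s x = s := by
  simp [PySem.Set.add, PySem.Set.contains, h]

lemma set_add_of_not_mem {s : PySem.Set String} {x : String} (h : x ∉ s) :
    PySem.Set.add s x = s ++ [x] := by
  simp [PySem.Set.add, PySem.Set.contains, h]

lemma foldl_add_skip (x : String) :
    ∀ (l : List String) (s : PySem.Set String), x ∈ s →
      l.foldl PySem.Set.add s = (l.filter (fun w => !(w == x))).foldl PySem.Set.add s := by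
  intro l
  induction l with
  | nil => intro s _; rfl
  | cons y r ih =>
    intro s hs
    by_cases hy : y = x
    · subst hy
      simp only [List.foldl_cons, List.filter_cons, beq_self_eq_true, Bool.not_true,
        Bool.false_eq_true, if_false, set_add_of_mem hs]
      exact ih s hs
    · simp only [List.foldl_cons, List.filter_cons, show (y == x) = false by simp [hy],
        Bool.not_false, if_pos]
      exact ih (PySem.Set.add s y) (mem_set_add hs)

lemma laterDup_foldl (l : List String) :
    ∀ (s : PySem.Set String),
      (laterDup l).foldl PySem.Set.add s
        = (l.filter (fun w => decide (1 < l.count w))).foldl PySem.Set.add s := by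
  induction l with
  | nil => intro s; rfl
  | cons x r ih =>
    intro s
    by_cases hx : x ∈ r
    · have hcnt : (1 < (x :: r).count x) := by
        have := List.count_pos_iff.mpr hx
        simp only [List.count_cons_self]; omega
      have hc : r.contains x = true := by simpa [List.contains_iff_mem] using hx
      simp only [laterDup, hc, if_pos, List.cons_append, List.nil_append, List.filter_cons,
        decide_eq_true_eq, hcnt, List.foldl_cons]
      rw [ih (PySem.Set.add s x),
          foldl_add_skip x (r.filter (fun w => decide (1 < r.count w))) _ (self_mem_set_add s x),
          foldl_add_skip x (r.filter (fun w => decide (1 < (x :: r).count w))) _ (self_mem_set_add s x)]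
      congr 1
      rw [List.filter_filter, List.filter_filter]
      apply List.filter_congr
      intro w hw
      by_cases hwx : w = x
      · simp [hwx]
      · have hxw : ¬ x = w := fun h => hwx h.symm
        have : (x :: r).count w = r.count w := by simp [hxw]
        simp [this]
    · have hcnt : ¬ (1 < (x :: r).count x) := by
        have : r.count x = 0 := List.count_eq_zero.mpr hx
        simp [List.count_cons_self, this]
      have hc : r.contains x = false := by simpa [List.contains_iff_mem] using hx
      simp only [laterDup, hc, List.nil_append, List.filter_cons, decide_eq_true_eq,
        hcnt, if_false, Bool.false_eq_true]
      rw [ih s]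
      congr 1
      apply List.filter_congr
      intro w hw
      have hwx : w ≠ x := fun h => hx (h ▸ hw)
      have hxw : ¬ x = w := fun h => hwx h.symm
      have : (x :: r).count w = r.count w := by simp [hxw]
      simp [this]

lemma ofList_snoc (m : List String) (a : String) :
    PySem.Set.ofList (m ++ [a]) = PySem.Set.add (PySem.Set.ofList m) a := by
  rw [PySem.Set.ofList_eq_foldl, PySem.Set.ofList_eq_foldl, List.foldl_append]
  rfl

lemma ofList_filter (q : String → Bool) (l : List String) :
    PySem.Set.ofList (l.filter q) = (PySem.Set.ofList l).filter q := by
  induction l using List.reverseRecOn with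
  | nil => rfl
  | append_singleton l a ih =>
    rw [List.filter_append, ofList_snoc]
    by_cases hq : q a = true
    · simp only [List.filter_cons, hq, if_pos, List.filter_nil]
      rw [ofList_snoc, ih]
      by_cases ha : a ∈ PySem.Set.ofList l
      · rw [set_add_of_mem ha,
          set_add_of_mem (List.mem_filter.mpr ⟨ha, hq⟩)]
      · rw [set_add_of_not_mem ha,
          set_add_of_not_mem (fun h => ha (List.mem_filter.mp h).1),
          List.filter_append]
        simp [hq]
    · simp only [List.filter_cons, hq, Bool.false_eq_true, if_false, List.filter_nil,
        List.append_nil, ih]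
      by_cases ha : a ∈ PySem.Set.ofList l
      · rw [set_add_of_mem ha]
      · rw [set_add_of_not_mem ha, List.filter_append]
        simp [hq]

-- ===== VERDICT (by name: the statement is the Claim_ definition above) =====
theorem bow_spec : Claim_equal_bow := by
  intro series _
  unfold Spec_bow bow bow_alt
  dsimp only
  set ws := series.flatMap (fun tweet => PySem.Str.split₀ tweet) with hws
  rw [bow_step_eq, ← List.foldl_flatMap, ← hws, PySem.Dict.foldl_insert_getD_add_one_eq_counter,
      PySem.Dict.items_counter, List.filter_map, List.map_map]
  have hE := enum_filter_eq ws 0 ws (by simp)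
  rw [Nat.cast_zero] at hE
  rw [hE]
  have hB : PySem.Set.ofList (laterDup ws)
      = (PySem.Set.ofList ws).filter (fun w => decide (1 < ws.count w)) := by
    rw [PySem.Set.ofList_eq_foldl, laterDup_foldl, ← PySem.Set.ofList_eq_foldl, ofList_filter]
  rw [hB]
  have hfun : ((fun (p : String × Int) => decide (1 < p.2)) ∘ fun k => (k, (ws.count k : Int)))
      = (fun w => decide (1 < ws.count w)) := by
    funext w
    simp only [Function.comp_apply]
    rw [decide_eq_decide]
    exact_mod_cast Iff.rfl
  rw [hfun]
  have hmap : ((PySem.Set.ofList ws).filter (fun w => decide (1 < ws.count w))).map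
      (Prod.fst ∘ fun k => (k, (ws.count k : Int)))
      = (PySem.Set.ofList ws).filter (fun w => decide (1 < ws.count w)) := by
    simp [Function.comp_def]
  rw [hmap]
  exact PySem.Set.ofList_eq_self_of_nodup _
    (List.Nodup.filter _ (PySem.Set.nodup_ofList ws))
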